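-- pv_equiv track=rewrite | github.com/who-man-tech/tasks | task15/main.py | transform
-- ===== SOURCE A (Python) =====
-- def transform(a):
--     k1 = []
--     k2 = []
--     k3 = []
--     k4 = []
--     for i, x in enumerate(a):
--         if i % 2 == 0: # Even
--             if x < 0:
--                 k2.append(x)
--             else:
--                 k4.append(x)
--         else:          # Odd
--             if x >= 0:
--                 k1.insert(0, x)
--             else:
--                 k3.insert(0, x)
--
--     k1.extend(k2)
--     k1.extend(k3)
--     k1.extend(k4)
--
--     return k1
-- ===== SOURCE B (Python) =====
-- def transform(a):
--     k2 = [x for i, x in enumerate(a) if i % 2 == 0 and x < 0]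
--     k4 = [x for i, x in enumerate(a) if i % 2 == 0 and x >= 0]
--     k1 = [x for i, x in enumerate(a) if i % 2 == 1 and x >= 0][::-1]
--     k3 = [x for i, x in enumerate(a) if i % 2 == 1 and x < 0][::-1]
--     return k1 + k2 + k3 + k4
-- ===== Notes on version B (the rewrite author's own statement) =====
-- stated objective: faster
-- what changed: Replaces the single branching loop with four accumulators (using quadratic insert(0,...) front insertions) by four independent linear filtering comprehensions over enumerate(a), with one [::-1] reversal each for the odd-index lists.
import Mathlib
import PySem

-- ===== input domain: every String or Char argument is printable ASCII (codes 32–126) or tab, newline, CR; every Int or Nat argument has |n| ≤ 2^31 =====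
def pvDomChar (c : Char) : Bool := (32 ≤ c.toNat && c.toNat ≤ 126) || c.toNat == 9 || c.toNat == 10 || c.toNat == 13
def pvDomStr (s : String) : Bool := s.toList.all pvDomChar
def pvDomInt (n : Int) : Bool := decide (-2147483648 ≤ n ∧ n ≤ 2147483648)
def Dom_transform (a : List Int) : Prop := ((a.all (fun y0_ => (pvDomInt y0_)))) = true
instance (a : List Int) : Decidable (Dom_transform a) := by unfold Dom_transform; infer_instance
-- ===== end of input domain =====

-- B replaces A's single branching loop (with costly front insertions) by four independent
-- filtering passes over enumerate(a) plus two reversals: a simpler decomposition, same results.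


-- ===== PORT A =====
-- one pass: append to k2/k4, insert(0,·) into k1/k3, then k1.extend(k2); k1.extend(k3); k1.extend(k4)
def transformStep (s : List Int × List Int × List Int × List Int) (p : Int × Int) :
    List Int × List Int × List Int × List Int :=
  if p.1 % 2 == 0 then
    if p.2 < 0 then (s.1, s.2.1 ++ [p.2], s.2.2.1, s.2.2.2)
    else (s.1, s.2.1, s.2.2.1, s.2.2.2 ++ [p.2])
  else
    if 0 ≤ p.2 then (p.2 :: s.1, s.2.1, s.2.2.1, s.2.2.2)
    else (s.1, s.2.1, p.2 :: s.2.2.1, s.2.2.2)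

def transform (a : List Int) : List Int :=
  let st := (PySem.List.enumerate a).foldl transformStep ([], [], [], [])
  st.1 ++ st.2.1 ++ st.2.2.1 ++ st.2.2.2

-- ===== PORT B =====
-- four filtering comprehensions over enumerate(a); [::-1] ported as List.reverse
def transform_alt (a : List Int) : List Int :=
  let e := PySem.List.enumerate a
  let k2 := (e.filter (fun p => p.1 % 2 == 0 && decide (p.2 < 0))).map Prod.snd
  let k4 := (e.filter (fun p => p.1 % 2 == 0 && decide (0 ≤ p.2))).map Prod.snd
  let k1 := ((e.filter (fun p => p.1 % 2 == 1 && decide (0 ≤ p.2))).map Prod.snd).reverse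
  let k3 := ((e.filter (fun p => p.1 % 2 == 1 && decide (p.2 < 0))).map Prod.snd).reverse
  k1 ++ k2 ++ k3 ++ k4

-- ===== PRECONDITION & SPEC =====
def Spec_transform (a : List Int) (out : List Int) : Prop := out = transform_alt a
instance (a : List Int) (out : List Int) : Decidable (Spec_transform a out) := by unfold Spec_transform; infer_instance

-- ===== CLAIM (what is proved, stated in full; the proofs are below) =====
def Claim_equal_transform : Prop := ∀ (a : List Int), Dom_transform a → Spec_transform a (transform a)

-- ===== LEMMAS AND PROOFS =====
theorem transform_loop_inv (l : List (Int × Int)) (k1 k2 k3 k4 : List Int) :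
    l.foldl transformStep (k1, k2, k3, k4) =
      (((l.filter (fun p => p.1 % 2 == 1 && decide (0 ≤ p.2))).map Prod.snd).reverse ++ k1,
       k2 ++ (l.filter (fun p => p.1 % 2 == 0 && decide (p.2 < 0))).map Prod.snd,
       ((l.filter (fun p => p.1 % 2 == 1 && decide (p.2 < 0))).map Prod.snd).reverse ++ k3,
       k4 ++ (l.filter (fun p => p.1 % 2 == 0 && decide (0 ≤ p.2))).map Prod.snd) := by
  induction l generalizing k1 k2 k3 k4 with
  | nil => simp
  | cons p t ih =>
    have hmod : p.1 % 2 = 0 ∨ p.1 % 2 = 1 := by omega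
    simp only [List.foldl_cons, List.filter_cons, transformStep]
    rcases hmod with h | h <;>
    rcases lt_or_ge p.2 0 with hx | hx <;>
      simp [h, ih, hx, not_le_of_gt, not_lt_of_ge, List.append_assoc]

-- ===== VERDICT (by name: the statement is the Claim_ definition above) =====
theorem transform_spec : Claim_equal_transform := by
  intro a _
  show transform a = transform_alt a
  simp [transform, transform_alt, transform_loop_inv]
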